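-- pv_equiv track=rewrite | github.com/rtmaww/X-Piece | mytokenizers.py | tokenize_plain
-- ===== SOURCE A (Python) =====
-- def tokenize_plain(chars, vocab):
--     start = 0
--     sub_tokens = []
--     while start < len(chars):
--         end = len(chars)
--         cur_substr = None
--         while start < end:
--             substr = "".join(chars[start:end])
--             if start > 0:
--                 substr = "##" + substr
--             if substr in vocab:
--                 cur_substr = substr
--                 break
--             end -= 1
--         if cur_substr is None:
--             return ["[UNK]"]
--         sub_tokens.append(cur_substr)
--         start = end
--     return sub_tokens
-- ===== SOURCE B (Python) =====
-- def tokenize_plain(chars, vocab):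
--     # Forward incremental scan with a hash set: for each start position, extend the
--     # candidate one piece at a time (no repeated join) and remember the longest hit.
--     vset = set(vocab)
--     n = len(chars)
--     sub_tokens = []
--     start = 0
--     while start < n:
--         acc = "##" if start > 0 else ""
--         best = None
--         best_end = start
--         for end in range(start + 1, n + 1):
--             acc = acc + chars[end - 1]
--             if acc in vset:
--                 best = acc
--                 best_end = end
--         if best is None:
--             return ["[UNK]"]
--         sub_tokens.append(best)
--         start = best_end
--     return sub_tokens
-- ===== Notes on version B (the rewrite author's own statement) =====
-- stated objective: faster
-- what changed: Replaces the backward first-match scan that re-joins chars[start:end] for every candidate end with a forward scan that extends one candidate string piece by piece, tracks the longest hit, and tests membership in a prebuilt set instead of scanning the vocab list.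
import Mathlib
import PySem

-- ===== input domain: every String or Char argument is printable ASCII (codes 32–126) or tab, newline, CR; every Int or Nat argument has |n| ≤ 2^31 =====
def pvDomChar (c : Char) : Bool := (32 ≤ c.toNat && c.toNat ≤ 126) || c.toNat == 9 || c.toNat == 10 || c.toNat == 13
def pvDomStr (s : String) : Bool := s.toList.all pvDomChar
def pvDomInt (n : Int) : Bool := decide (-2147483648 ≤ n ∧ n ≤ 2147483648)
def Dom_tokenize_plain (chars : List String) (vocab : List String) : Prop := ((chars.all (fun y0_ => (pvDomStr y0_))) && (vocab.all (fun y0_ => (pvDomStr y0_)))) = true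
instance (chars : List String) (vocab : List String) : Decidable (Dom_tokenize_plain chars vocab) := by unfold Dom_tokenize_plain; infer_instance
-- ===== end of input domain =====

-- B replaces A's backward first-match scan (re-joining chars[start:end] for each candidate)
-- with a forward piece-by-piece scan that keeps the longest hit and looks candidates up in a set.


-- ===== PORT A =====
-- inner 'while start < end' loop: scan end downward, first (i.e. longest) match wins
def pvAInner (chars : List String) (vocab : List String) (start : Nat) : Nat → Option (String × Nat)
  | endv =>
    if h : start < endv then
      -- substr = "".join(chars[start:end]); if start > 0: substr = "##" + substr
      let substr := PySem.Str.join "" (PySem.List.slice chars (some (start : Int)) (some (endv : Int)))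
      let substr := if start > 0 then "##" ++ substr else substr
      if vocab.contains substr then some (substr, endv)
      else pvAInner chars vocab start (endv - 1)
    else none
  termination_by endv => endv
  decreasing_by omega

-- outer 'while start < len(chars)' loop; fuel = chars.length bounds the iteration count
-- (start strictly increases each round), so the fuel-0 branch is never the returned value
def pvAOuter (chars : List String) (vocab : List String) : Nat → Nat → List String → List String
  | 0, _, acc => acc
  | fuel + 1, start, acc =>
    if start < chars.length then
      match pvAInner chars vocab start chars.length with
      | none => ["[UNK]"]
      | some (sub, endv) => pvAOuter chars vocab fuel endv (acc ++ [sub])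
    else acc

def tokenize_plain (chars : List String) (vocab : List String) : List String :=
  pvAOuter chars vocab chars.length 0 []

-- ===== PORT B =====
-- inner 'for end in range(start+1, n+1)' loop: extend acc by one piece, keep the last (longest) hit
def pvBInner (chars : List String) (vset : PySem.Set String) (n : Nat) : Nat → String → Option (String × Nat) → Option (String × Nat)
  | endv, acc, best =>
    if h : endv < n then
      let acc' := acc ++ PySem.List.pyGetD chars (endv : Int) ""   -- chars[end-1]; always in range here
      let best' := if PySem.Set.contains vset acc' then some (acc', endv + 1) else best
      pvBInner chars vset n (endv + 1) acc' best'
    else best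
  termination_by endv _ _ => n - endv
  decreasing_by omega

def pvBOuter (chars : List String) (vset : PySem.Set String) : Nat → Nat → List String → List String
  | 0, _, acc => acc
  | fuel + 1, start, acc =>
    if start < chars.length then
      match pvBInner chars vset chars.length start (if start > 0 then "##" else "") none with
      | none => ["[UNK]"]
      | some (best, bend) => pvBOuter chars vset fuel bend (acc ++ [best])
    else acc

def tokenize_plain_alt (chars : List String) (vocab : List String) : List String :=
  pvBOuter chars (PySem.Set.ofList vocab) chars.length 0 []

-- ===== PRECONDITION & SPEC =====
def Spec_tokenize_plain (chars : List String) (vocab : List String) (out : List String) : Prop := out = tokenize_plain_alt chars vocab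
instance (chars : List String) (vocab : List String) (out : List String) : Decidable (Spec_tokenize_plain chars vocab out) := by unfold Spec_tokenize_plain; infer_instance

-- ===== CLAIM (what is proved, stated in full; the proofs are below) =====
def Claim_equal_tokenize_plain : Prop := ∀ (chars : List String) (vocab : List String), Dom_tokenize_plain chars vocab → Spec_tokenize_plain chars vocab (tokenize_plain chars vocab)

-- ===== LEMMAS AND PROOFS =====

-- the candidate token at (start, e): optional "##" plus the join of chars[start:e]
def pvSub (chars : List String) (start e : Nat) : String :=
  (if start > 0 then "##" else "") ++ PySem.Str.join "" (PySem.List.slice chars (some (start : Int)) (some (e : Int)))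

-- abstract top-down scan: first e in (lo, hi] from the top with q e, i.e. the LARGEST match
def pvScanDown (q : Nat → Bool) (lo : Nat) : Nat → Option Nat
  | hi => if lo < hi then (if q hi then some hi else pvScanDown q lo (hi - 1)) else none
  termination_by hi => hi
  decreasing_by omega

theorem pv_flatten_intersperse_nil {α : Type} (xs : List (List α)) :
    (List.intersperse [] xs).flatten = xs.flatten := by
  induction xs with
  | nil => rfl
  | cons a t ih =>
    cases t with
    | nil => rfl
    | cons b u => simpa [List.intersperse] using ih

theorem pv_join_empty (parts : List String) :
    PySem.Str.join "" parts = String.ofList (parts.map String.toList).flatten := by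
  simp [PySem.Str.join, PySem.Chars.join, List.intercalate, pv_flatten_intersperse_nil]

theorem pvSub_succ (chars : List String) (start e : Nat) (hse : start ≤ e) (hen : e < chars.length) :
    pvSub chars start (e + 1) = pvSub chars start e ++ PySem.List.pyGetD chars (e : Int) "" := by
  unfold pvSub
  rw [String.append_assoc]
  congr 1
  rw [PySem.List.slice_natCast, PySem.List.slice_natCast, pv_join_empty, pv_join_empty,
    PySem.List.pyGetD_natCast]
  have h1 : e + 1 - start = (e - start) + 1 := by omega
  have h2 : e - start < (chars.drop start).length := by simp; omega
  rw [h1, List.take_add_one]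
  have h3 : (chars.drop start)[e - start]? = some chars[e] := by
    rw [List.getElem?_eq_getElem h2]
    congr 1
    rw [List.getElem_drop]
    congr 1
    omega
  rw [h3]
  simp [String.ofList_append]
  rw [List.getElem?_eq_getElem hen]
  rfl

theorem pvSub_eq (chars : List String) (start e : Nat) :
    (if start > 0 then "##" ++ PySem.Str.join "" (PySem.List.slice chars (some (start : Int)) (some (e : Int)))
     else PySem.Str.join "" (PySem.List.slice chars (some (start : Int)) (some (e : Int)))) = pvSub chars start e := by
  unfold pvSub
  by_cases h : start > 0 <;> simp [h]

theorem pvAInner_eq_scan (chars vocab : List String) (start : Nat) : ∀ hi,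
    pvAInner chars vocab start hi
      = (pvScanDown (fun e => vocab.contains (pvSub chars start e)) start hi).map
          (fun e => (pvSub chars start e, e)) := by
  intro hi
  induction hi using Nat.strong_induction_on with
  | _ hi ih =>
    rw [pvAInner, pvScanDown]
    by_cases h : start < hi
    · simp only [h, dif_pos, if_pos, pvSub_eq chars]
      by_cases hq : pvSub chars start hi ∈ vocab
      · simp only [hq, if_pos, List.contains_iff_mem, Option.map_some]
      · simp only [hq, if_neg, List.contains_iff_mem, not_false_iff]
        exact ih (hi - 1) (by omega)
    · simp [h]

theorem pvScanDown_peel_bottom (q : Nat → Bool) (lo : Nat) : ∀ hi, lo < hi →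
    pvScanDown q lo hi
      = match pvScanDown q (lo + 1) hi with
        | some e => some e
        | none => if q (lo + 1) then some (lo + 1) else none := by
  intro hi
  induction hi using Nat.strong_induction_on with
  | _ hi ih =>
    intro h
    conv_rhs => rw [pvScanDown]
    rw [pvScanDown]
    by_cases h2 : lo + 1 < hi
    · simp only [h, if_pos, h2]
      by_cases hq : q hi
      · simp [hq]
      · simp only [hq, Bool.false_eq_true, if_false]
        exact ih (hi - 1) (by omega) (by omega)
    · have he : hi = lo + 1 := by omega
      subst he
      simp only [h, if_pos, lt_irrefl]
      rw [pvScanDown]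
      simp

theorem pv_contains_ofList (vocab : List String) (x : String) :
    PySem.Set.contains (PySem.Set.ofList vocab) x = vocab.contains x := by
  rw [Bool.eq_iff_iff, PySem.Set.contains_iff, PySem.Set.mem_ofList, List.contains_iff_mem]

theorem pvBInner_eq_scan (chars vocab : List String) (start : Nat) :
    ∀ e, start ≤ e → e ≤ chars.length → ∀ best,
      pvBInner chars (PySem.Set.ofList vocab) chars.length e (pvSub chars start e) best
        = match pvScanDown (fun e' => vocab.contains (pvSub chars start e')) e chars.length with
          | some e' => some (pvSub chars start e', e')
          | none => best := by
  suffices H : ∀ k e, chars.length - e = k → start ≤ e → e ≤ chars.length → ∀ best,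
      pvBInner chars (PySem.Set.ofList vocab) chars.length e (pvSub chars start e) best
        = match pvScanDown (fun e' => vocab.contains (pvSub chars start e')) e chars.length with
          | some e' => some (pvSub chars start e', e')
          | none => best by
    exact fun e h1 h2 best => H _ e rfl h1 h2 best
  intro k
  induction k with
  | zero =>
    intro e hk hse hen best
    have he : ¬ e < chars.length := by omega
    rw [pvBInner, pvScanDown]
    simp [he]
  | succ k ihk =>
    intro e hk hse hen best
    have he : e < chars.length := by omega
    rw [pvBInner]
    simp only [he, dif_pos]
    rw [← pvSub_succ chars start e hse he, pv_contains_ofList]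
    rw [ihk (e + 1) (by omega) (by omega) (by omega)]
    rw [pvScanDown_peel_bottom _ e chars.length he]
    cases hscan : pvScanDown (fun e' => vocab.contains (pvSub chars start e')) (e + 1) chars.length with
    | some e' => simp
    | none =>
      simp only
      by_cases hq : pvSub chars start (e + 1) ∈ vocab <;> simp [hq]

theorem pvOuter_eq (chars vocab : List String) :
    ∀ fuel start acc, pvAOuter chars vocab fuel start acc
      = pvBOuter chars (PySem.Set.ofList vocab) fuel start acc := by
  intro fuel
  induction fuel with
  | zero => intro start acc; rfl
  | succ fuel ih =>
    intro start acc
    rw [pvAOuter, pvBOuter]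
    by_cases h : start < chars.length
    · simp only [h, if_pos]
      have hsub : (if start > 0 then "##" else "") = pvSub chars start start := by
        unfold pvSub
        rw [PySem.List.slice_natCast]
        simp [pv_join_empty]
      rw [hsub, pvBInner_eq_scan chars vocab start start le_rfl (le_of_lt h),
        pvAInner_eq_scan chars vocab start chars.length]
      cases pvScanDown (fun e => vocab.contains (pvSub chars start e)) start chars.length with
      | none => rfl
      | some e => simp only [Option.map_some]; exact ih e (acc ++ [pvSub chars start e])
    · simp [h]

-- ===== VERDICT (by name: the statement is the Claim_ definition above) =====
theorem tokenize_plain_spec : Claim_equal_tokenize_plain := by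
  intro chars vocab _
  unfold Spec_tokenize_plain tokenize_plain tokenize_plain_alt
  exact pvOuter_eq chars vocab chars.length 0 []
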